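-- pv_equiv track=rewrite | github.com/Todd7777/VAGS_run | edit_pipeline.py | decompose_prompt
-- ===== SOURCE A (Python) =====
-- def decompose_prompt(prompt):
--     """
--     Découpe le prompt de manière plus robuste.
--     """
--     parts = []
--     # Découpage basique, pourrait être remplacé par un NLP (Spacy/NLTK) pour plus de précision
--     delimiters = [',', ' and ', '.']
--
--     current_parts = [prompt]
--     for delimiter in delimiters:
--         new_parts = []
--         for p in current_parts:
--             new_parts.extend(p.split(delimiter))
--         current_parts = new_parts
--
--     return [p.strip() for p in current_parts if p.strip()]
-- ===== SOURCE B (Python) =====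
-- def decompose_prompt(prompt):
--     """
--     Single left-to-right pass: cut the prompt at each ',', '.' or ' and '
--     occurrence as it is met, then strip pieces and drop empties.
--     """
--     parts = []
--     cur = []
--     i = 0
--     n = len(prompt)
--     while i < n:
--         c = prompt[i]
--         if c == ',' or c == '.':
--             parts.append(''.join(cur))
--             cur = []
--             i += 1
--         elif c == ' ' and prompt[i:i + 5] == ' and ':
--             parts.append(''.join(cur))
--             cur = []
--             i += 5
--         else:
--             cur.append(c)
--             i += 1
--     parts.append(''.join(cur))
--     return [p.strip() for p in parts if p.strip()]
-- ===== Notes on version B (the rewrite author's own statement) =====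
-- stated objective: alternative
-- what changed: Replaces the three cascading per-delimiter split passes over a growing list of pieces with a single left-to-right character scan that cuts the prompt at each comma, period or and-delimiter occurrence as it is met; the strip-and-drop-empties tail is unchanged.
import Mathlib
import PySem

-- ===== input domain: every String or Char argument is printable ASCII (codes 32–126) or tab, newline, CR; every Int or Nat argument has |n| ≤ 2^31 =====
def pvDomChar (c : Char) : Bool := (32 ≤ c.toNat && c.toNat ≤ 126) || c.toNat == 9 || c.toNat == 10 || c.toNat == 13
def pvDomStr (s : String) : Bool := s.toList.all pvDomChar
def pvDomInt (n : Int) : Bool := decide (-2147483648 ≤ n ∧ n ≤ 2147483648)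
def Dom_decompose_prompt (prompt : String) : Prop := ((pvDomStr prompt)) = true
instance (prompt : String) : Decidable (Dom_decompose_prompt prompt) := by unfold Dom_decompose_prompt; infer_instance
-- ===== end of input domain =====

-- B replaces A's three cascading split passes by one left-to-right scan cutting at each delimiter occurrence (objective: alternative single-pass algorithm).

-- ===== PORT A =====
-- A: cascading splits — fold over the three delimiters, each pass re-splitting every current piece; then strip and drop empty pieces.
def decompose_prompt (prompt : String) : List String :=
  let delimiters : List String := [",", " and ", "."]
  let current_parts : List (List Char) :=
    delimiters.foldl
      (fun cur d => cur.flatMap (fun p => PySem.Chars.splitOn p d.toList))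
      [prompt.toList]
  (current_parts.filter (fun p => !(PySem.Chars.strip p).isEmpty)).map
    (fun p => String.ofList (PySem.Chars.strip p))

-- ===== PORT B =====
def pvAndSep : List Char := [' ', 'a', 'n', 'd', ' ']

-- B's scanner: one pass, `cur` is the current piece (reversed), emit a piece at each delimiter.
def pvTokB : List Char → List Char → List (List Char)
  | cur, [] => [cur.reverse]
  | cur, c :: rest =>
    if c = ',' ∨ c = '.' then cur.reverse :: pvTokB [] rest
    else if c = ' ' ∧ pvAndSep.isPrefixOf (c :: rest) then cur.reverse :: pvTokB [] (rest.drop 4)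
    else pvTokB (c :: cur) rest
termination_by _ cs => cs.length
decreasing_by all_goals (simp; try omega)

def decompose_prompt_alt (prompt : String) : List String :=
  let parts := pvTokB [] prompt.toList
  (parts.filter (fun p => !(PySem.Chars.strip p).isEmpty)).map
    (fun p => String.ofList (PySem.Chars.strip p))

-- ===== PRECONDITION & SPEC =====
def Spec_decompose_prompt (prompt : String) (out : List String) : Prop := out = decompose_prompt_alt prompt
instance (prompt : String) (out : List String) : Decidable (Spec_decompose_prompt prompt out) := by unfold Spec_decompose_prompt; infer_instance

-- ===== CLAIM (what is proved, stated in full; the proofs are below) =====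
def Claim_equal_decompose_prompt : Prop := ∀ (prompt : String), Dom_decompose_prompt prompt → Spec_decompose_prompt prompt (decompose_prompt prompt)

-- ===== LEMMAS AND PROOFS =====

-- cons a chunk onto the head piece of a piece list
def pvConsHead (x : List Char) : List (List Char) → List (List Char)
  | [] => [x]
  | h :: t => (x ++ h) :: t

-- clean accumulator-free scanner for a single delimiter a::sep (= leftmost-occurrence split)
def pvSpl (a : Char) (sep : List Char) : List Char → List (List Char)
  | [] => [[]]
  | c :: rest =>
    if (a :: sep).isPrefixOf (c :: rest) then [] :: pvSpl a sep (rest.drop sep.length)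
    else pvConsHead [c] (pvSpl a sep rest)
termination_by cs => cs.length
decreasing_by all_goals (simp; try omega)

-- accumulator-free form of pvTokB
def pvTok3 : List Char → List (List Char)
  | [] => [[]]
  | c :: rest =>
    if c = ',' ∨ c = '.' then [] :: pvTok3 rest
    else if c = ' ' ∧ pvAndSep.isPrefixOf (c :: rest) then [] :: pvTok3 (rest.drop 4)
    else pvConsHead [c] (pvTok3 rest)
termination_by cs => cs.length
decreasing_by all_goals (simp; try omega)

theorem pvConsHead_ne_nil (x : List Char) (l : List (List Char)) : pvConsHead x l ≠ [] := by
  cases l <;> simp [pvConsHead]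

theorem pvConsHead_nil (l : List (List Char)) (h : l ≠ []) : pvConsHead [] l = l := by
  cases l with
  | nil => exact absurd rfl h
  | cons a t => simp [pvConsHead]

theorem pvConsHead_consHead (x y : List Char) (l : List (List Char)) :
    pvConsHead x (pvConsHead y l) = pvConsHead (x ++ y) l := by
  cases l <;> simp [pvConsHead]

theorem pvSpl_ne_nil (a : Char) (sep : List Char) (cs : List Char) : pvSpl a sep cs ≠ [] := by
  cases cs with
  | nil => simp [pvSpl]
  | cons c rest =>
    rw [pvSpl]
    split
    · simp
    · exact pvConsHead_ne_nil _ _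

theorem pvTok3_ne_nil (cs : List Char) : pvTok3 cs ≠ [] := by
  cases cs with
  | nil => simp [pvTok3]
  | cons c rest =>
    rw [pvTok3]
    split
    · simp
    · split
      · simp
      · exact pvConsHead_ne_nil _ _

theorem pvTokB_eq (cur cs : List Char) : pvTokB cur cs = pvConsHead cur.reverse (pvTok3 cs) := by
  induction cur, cs using pvTokB.induct with
  | case1 cur => simp [pvTokB, pvTok3, pvConsHead]
  | case2 cur c rest h ih =>
    rw [pvTokB, pvTok3, if_pos h, if_pos h, ih, List.reverse_nil,
        pvConsHead_nil _ (pvTok3_ne_nil rest)]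
    cases pvTok3 rest <;> simp [pvConsHead]
  | case3 cur c rest h1 h2 ih =>
    rw [pvTokB, pvTok3, if_neg h1, if_neg h1, if_pos h2, if_pos h2, ih, List.reverse_nil,
        pvConsHead_nil _ (pvTok3_ne_nil _)]
    cases pvTok3 (rest.drop 4) <;> simp [pvConsHead]
  | case4 cur c rest h1 h2 ih =>
    rw [pvTokB, pvTok3, if_neg h1, if_neg h1, if_neg h2, if_neg h2, ih]
    rw [show (c :: cur).reverse = cur.reverse ++ [c] by simp, ← pvConsHead_consHead]

-- PySem's fuelled splitOn.go computes pvSpl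
theorem pvGo_spec (a : Char) (sep : List Char) :
    ∀ (fuel : Nat) (l cur : List Char) (acc : List (List Char)), l.length < fuel →
    PySem.Chars.splitOn.go (a :: sep) fuel l cur acc =
      acc.reverse ++ pvConsHead cur.reverse (pvSpl a sep l) := by
  intro fuel
  induction fuel with
  | zero => intro l cur acc h; omega
  | succ n ih =>
    intro l cur acc h
    cases l with
    | nil =>
      rw [PySem.Chars.splitOn.go, pvSpl]
      · simp [pvConsHead]
      all_goals omega
    | cons c rest =>
      rw [PySem.Chars.splitOn.go, pvSpl]
      by_cases hp : (a :: sep).isPrefixOf (c :: rest) = true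
      · rw [if_pos hp, if_pos hp]
        simp only [List.length_cons, List.drop_succ_cons, List.reverse_nil]
        rw [ih _ _ _ (by simp only [List.length_cons] at h; simp only [List.length_drop]; omega)]
        cases hL : pvSpl a sep (List.drop sep.length rest) with
        | nil => exact absurd hL (pvSpl_ne_nil _ _ _)
        | cons hh tt => simp [pvConsHead]
      · rw [if_neg hp, if_neg hp]
        rw [ih _ _ _ (by simp only [List.length_cons] at h; omega)]
        rw [show (c :: cur).reverse = cur.reverse ++ [c] by simp, ← pvConsHead_consHead]

theorem pvSplitOn_eq (a : Char) (sep : List Char) (cs : List Char) :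
    PySem.Chars.splitOn cs (a :: sep) = pvSpl a sep cs := by
  rw [PySem.Chars.splitOn, pvGo_spec a sep _ _ _ _ (by omega)]
  simp [pvConsHead_nil _ (pvSpl_ne_nil _ _ _)]

-- head piece of a split is a prefix of the input
theorem pvSpl_head_prefix (a : Char) (sep : List Char) (cs : List Char) :
    ∀ h t, pvSpl a sep cs = h :: t → h <+: cs := by
  induction cs using pvSpl.induct a sep with
  | case1 =>
    intro h t he
    rw [pvSpl] at he
    cases he
    exact List.nil_prefix
  | case2 c rest hp ih =>
    intro h t he
    rw [pvSpl, if_pos hp] at he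
    cases he
    exact List.nil_prefix
  | case3 c rest hp ih =>
    intro h t he
    rw [pvSpl, if_neg hp] at he
    cases hL : pvSpl a sep rest with
    | nil => exact absurd hL (pvSpl_ne_nil _ _ _)
    | cons h' t' =>
      rw [hL] at he
      simp only [pvConsHead, List.cons.injEq] at he
      obtain ⟨rfl, rfl⟩ := he
      exact (List.cons_prefix_cons).2 ⟨rfl, ih _ _ hL⟩

-- splitting on a single char not occurring in w prepends w to the head piece
theorem pvSpl_prepend (a : Char) (w z : List Char) (hw : a ∉ w) :
    pvSpl a [] (w ++ z) = pvConsHead w (pvSpl a [] z) := by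
  induction w with
  | nil => rw [pvConsHead_nil _ (pvSpl_ne_nil _ _ _)]; rfl
  | cons c w' ih =>
    have hne : ¬ ([a].isPrefixOf (c :: (w' ++ z)) = true) := by
      simp only [List.isPrefixOf, List.isPrefixOf_nil_left, Bool.and_true, beq_iff_eq]
      intro hac
      exact hw (hac ▸ List.mem_cons_self)
    rw [List.cons_append, pvSpl, if_neg hne, ih (fun hm => hw (List.mem_cons_of_mem _ hm)),
        pvConsHead_consHead]
    simp

-- abbreviations for the second and third split stages and their composite (proof-only)
def pvS2 (p : List Char) : List (List Char) := pvSpl ' ' ['a', 'n', 'd', ' '] p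

def pvG (p : List Char) : List (List Char) := (pvS2 p).flatMap (fun q => pvSpl '.' [] q)

def pvC (cs : List Char) : List (List Char) := (pvSpl ',' [] cs).flatMap pvG

theorem pvG_ne_nil (p : List Char) : pvG p ≠ [] := by
  unfold pvG
  cases hL : pvS2 p with
  | nil => exact absurd hL (pvSpl_ne_nil _ _ _)
  | cons h t =>
    simp only [List.flatMap_cons]
    cases hM : pvSpl '.' [] h with
    | nil => exact absurd hM (pvSpl_ne_nil _ _ _)
    | cons h' t' => simp

theorem pvConsHead_append (x : List Char) (A B : List (List Char)) (hA : A ≠ []) :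
    pvConsHead x (A ++ B) = pvConsHead x A ++ B := by
  cases A with
  | nil => exact absurd rfl hA
  | cons h t => simp [pvConsHead]

-- the ' and '-then-'.' composite over one piece, by cases on its first character
theorem pvG_nil : pvG [] = [[]] := by
  unfold pvG pvS2
  rw [pvSpl]
  simp only [List.flatMap_cons, List.flatMap_nil]
  rw [pvSpl]
  rfl

theorem pvG_and (h : List Char) : pvG (pvAndSep ++ h) = [] :: pvG h := by
  unfold pvG pvS2
  have hp : (' ' :: ['a','n','d',' ']).isPrefixOf (pvAndSep ++ h) = true := by
    rw [List.isPrefixOf_iff_prefix]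
    exact ⟨h, rfl⟩
  rw [show pvAndSep ++ h = ' ' :: (['a','n','d',' '] ++ h) by rfl] at hp ⊢
  rw [pvSpl, if_pos hp]
  simp only [List.flatMap_cons, List.drop_succ_cons, List.drop_zero, List.length_cons,
    List.length_nil]
  rw [show pvSpl '.' [] [] = [[]] by rw [pvSpl]]
  simp [List.drop]

theorem pvG_dot (h : List Char) : pvG ('.' :: h) = [] :: pvG h := by
  unfold pvG pvS2
  have hp : ¬ ((' ' :: ['a','n','d',' ']).isPrefixOf ('.' :: h) = true) := by
    simp [List.isPrefixOf]
  rw [pvSpl, if_neg hp]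
  cases hL : pvSpl ' ' ['a','n','d',' '] h with
  | nil => exact absurd hL (pvSpl_ne_nil _ _ _)
  | cons h2 t2 =>
    simp only [pvConsHead, List.flatMap_cons, List.singleton_append]
    have hd : pvSpl '.' [] ('.' :: h2) = [] :: pvSpl '.' [] h2 := by
      rw [pvSpl, if_pos (by simp [List.isPrefixOf])]
      simp
    rw [hd]
    simp

theorem pvG_cons (c : Char) (h : List Char) (hdot : c ≠ '.')
    (hand : ¬ (pvAndSep.isPrefixOf (c :: h) = true)) :
    pvG (c :: h) = pvConsHead [c] (pvG h) := by
  unfold pvG pvS2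
  rw [pvSpl, if_neg (by exact hand)]
  cases hL : pvSpl ' ' ['a','n','d',' '] h with
  | nil => exact absurd hL (pvSpl_ne_nil _ _ _)
  | cons h2 t2 =>
    simp only [pvConsHead, List.flatMap_cons, List.singleton_append]
    have hd : pvSpl '.' [] (c :: h2) = pvConsHead [c] (pvSpl '.' [] h2) := by
      rw [pvSpl, if_neg (by simp [List.isPrefixOf]; intro hc; exact absurd hc.symm hdot)]
    rw [hd]
    cases hM : pvSpl '.' [] h2 with
    | nil => exact absurd hM (pvSpl_ne_nil _ _ _)
    | cons h3 t3 => simp [pvConsHead]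

-- MAIN: the cascade of the three splits equals the one-pass scanner
theorem pvMainAux : ∀ (n : Nat) (cs : List Char), cs.length ≤ n → pvC cs = pvTok3 cs := by
  intro n
  induction n with
  | zero =>
    intro cs hlen
    rw [List.length_eq_zero_iff.1 (Nat.le_zero.1 hlen)]
    unfold pvC
    rw [pvSpl, pvTok3]
    simp [pvG_nil]
  | succ n ih =>
    intro cs hlen
    cases cs with
    | nil =>
      unfold pvC
      rw [pvSpl, pvTok3]
      simp [pvG_nil]
    | cons c rest =>
      simp only [List.length_cons, Nat.succ_le_succ_iff] at hlen
      by_cases hcd : c = ',' ∨ c = '.'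
      · rw [pvTok3, if_pos hcd]
        rcases hcd with rfl | rfl
        · -- comma: first split cuts here
          unfold pvC
          rw [pvSpl, if_pos (by simp [List.isPrefixOf])]
          simp only [List.length_nil, List.drop_zero, List.flatMap_cons, pvG_nil,
            List.singleton_append]
          rw [← pvC, ih rest hlen]
        · -- dot: the piece reaching the third split starts with '.'
          unfold pvC
          rw [pvSpl, if_neg (by simp [List.isPrefixOf])]
          cases hL : pvSpl ',' [] rest with
          | nil => exact absurd hL (pvSpl_ne_nil _ _ _)
          | cons h1 t1 =>
            simp only [pvConsHead, List.flatMap_cons, List.singleton_append]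
            rw [pvG_dot]
            rw [show ([] : List Char) :: pvG h1 = [[]] ++ pvG h1 by rfl, List.append_assoc]
            rw [show pvG h1 ++ t1.flatMap pvG = pvC rest by rw [pvC, hL]; simp]
            rw [ih rest hlen]
            simp
      · push_neg at hcd
        by_cases hand : c = ' ' ∧ pvAndSep.isPrefixOf (c :: rest) = true
        · -- ' and ' occurrence: all five characters sit in one comma-piece
          rw [pvTok3, if_neg (by push_neg; exact hcd), if_pos hand]
          obtain ⟨hsp, hpre⟩ := hand
          obtain ⟨z, hz⟩ := List.isPrefixOf_iff_prefix.1 hpre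
          have hz' := hz
          rw [show pvAndSep = ' ' :: ['a','n','d',' '] from rfl, List.cons_append] at hz'
          have hrest : rest = ['a','n','d',' '] ++ z := by
            injection hz' with h1 h2
            exact h2.symm
          have hdrop : rest.drop 4 = z := by rw [hrest]; simp
          unfold pvC
          rw [show c :: rest = pvAndSep ++ z by rw [← hz]]
          rw [pvSpl_prepend ',' pvAndSep z (by decide)]
          cases hL : pvSpl ',' [] z with
          | nil => exact absurd hL (pvSpl_ne_nil _ _ _)
          | cons h1 t1 =>
            simp only [pvConsHead, List.flatMap_cons]
            rw [pvG_and]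
            simp only [List.cons_append]
            rw [show pvG h1 ++ t1.flatMap pvG = pvC z by rw [pvC, hL]; simp]
            rw [hdrop, ih z (by rw [← hdrop]; simp only [List.length_drop]; omega)]
        · -- ordinary character: it is consed onto the head piece at every stage
          rw [pvTok3, if_neg (by push_neg; exact hcd), if_neg hand]
          unfold pvC
          rw [pvSpl, if_neg (by simp [List.isPrefixOf]; intro hc; exact absurd hc.symm hcd.1)]
          cases hL : pvSpl ',' [] rest with
          | nil => exact absurd hL (pvSpl_ne_nil _ _ _)
          | cons h1 t1 =>
            simp only [pvConsHead, List.flatMap_cons, List.singleton_append]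
            have hnand : ¬ (pvAndSep.isPrefixOf (c :: h1) = true) := by
              intro hp
              by_cases hsp : c = ' '
              · apply hand
                refine ⟨hsp, ?_⟩
                rw [List.isPrefixOf_iff_prefix] at hp ⊢
                exact hp.trans ((List.cons_prefix_cons).2 ⟨rfl, pvSpl_head_prefix ',' [] rest h1 t1 hL⟩)
              · rw [List.isPrefixOf_iff_prefix] at hp
                exact hsp ((List.cons_prefix_cons).1 (by simpa [pvAndSep] using hp)).1.symm
            rw [pvG_cons c h1 hcd.2 hnand]
            rw [← pvConsHead_append _ _ _ (pvG_ne_nil h1)]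
            rw [show pvG h1 ++ t1.flatMap pvG = pvC rest by rw [pvC, hL]; simp]
            rw [ih rest hlen]
            cases hT : pvTok3 rest with
            | nil => exact absurd hT (pvTok3_ne_nil _)
            | cons h t => simp [pvConsHead]

theorem pvMain (cs : List Char) :
    ((pvSpl ',' [] cs).flatMap (fun p => pvSpl ' ' ['a', 'n', 'd', ' '] p)).flatMap
      (fun p => pvSpl '.' [] p) = pvTok3 cs := by
  rw [List.flatMap_assoc]
  exact pvMainAux cs.length cs le_rfl

-- ===== VERDICT (by name: the statement is the Claim_ definition above) =====
theorem decompose_prompt_spec : Claim_equal_decompose_prompt := by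
  intro prompt _
  unfold Spec_decompose_prompt decompose_prompt decompose_prompt_alt
  simp only [List.foldl_cons, List.foldl_nil, List.flatMap_cons, List.flatMap_nil,
    List.append_nil]
  rw [show (",").toList = [','] from rfl, show (" and ").toList = [' ','a','n','d',' '] from rfl,
      show (".").toList = ['.'] from rfl]
  rw [pvSplitOn_eq ',' [] prompt.toList]
  have hmap : ∀ l : List (List Char),
      (l.flatMap fun p => PySem.Chars.splitOn p [' ','a','n','d',' ']) =
        l.flatMap fun p => pvSpl ' ' ['a','n','d',' '] p := by
    intro l
    exact List.flatMap_congr (fun p _ => pvSplitOn_eq ' ' ['a','n','d',' '] p)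
  have hmap3 : ∀ l : List (List Char),
      (l.flatMap fun p => PySem.Chars.splitOn p ['.']) = l.flatMap fun p => pvSpl '.' [] p := by
    intro l
    exact List.flatMap_congr (fun p _ => pvSplitOn_eq '.' [] p)
  rw [hmap, hmap3, pvMain, pvTokB_eq, List.reverse_nil, pvConsHead_nil _ (pvTok3_ne_nil _)]
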